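-- pv_equiv track=rewrite | github.com/EvaSzlifierzCriado/TFG | RefenrenceProblems/Partition/Partition.py | CPU_loop_ArrayMatMul
-- ===== SOURCE A (Python) =====
-- def CPU_loop_ArrayMatMul(A,B):
--
--     NcA = len(A)
--     NrB = len(B)
--     NcB = len(B[0])
--
--     assert NcA == NrB
--
--     res = []
--
--     for i in range(NcB):
--         sum = 0
--         for j in range(NcA):
--             sum += B[j][i] * A[j]
--         res.append(sum)
--     return(res)
-- ===== SOURCE B (Python) =====
-- def CPU_loop_ArrayMatMul(A, B):
--     NcB = len(B[0])
--     assert len(A) == len(B)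
--     res = [0] * NcB
--     for aj, row in zip(A, B):
--         res = [res[i] + row[i] * aj for i in range(NcB)]
--     return res
-- ===== Notes on version B (the rewrite author's own statement) =====
-- stated objective: alternative
-- what changed: B interchanges the loops: instead of finishing one output scalar at a time with an inner scan over rows, it keeps the whole result vector and accumulates each row's contribution into it in a single pass over zip(A, B); per-element addition order (j ascending) is preserved, so results are identical.
import Mathlib
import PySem

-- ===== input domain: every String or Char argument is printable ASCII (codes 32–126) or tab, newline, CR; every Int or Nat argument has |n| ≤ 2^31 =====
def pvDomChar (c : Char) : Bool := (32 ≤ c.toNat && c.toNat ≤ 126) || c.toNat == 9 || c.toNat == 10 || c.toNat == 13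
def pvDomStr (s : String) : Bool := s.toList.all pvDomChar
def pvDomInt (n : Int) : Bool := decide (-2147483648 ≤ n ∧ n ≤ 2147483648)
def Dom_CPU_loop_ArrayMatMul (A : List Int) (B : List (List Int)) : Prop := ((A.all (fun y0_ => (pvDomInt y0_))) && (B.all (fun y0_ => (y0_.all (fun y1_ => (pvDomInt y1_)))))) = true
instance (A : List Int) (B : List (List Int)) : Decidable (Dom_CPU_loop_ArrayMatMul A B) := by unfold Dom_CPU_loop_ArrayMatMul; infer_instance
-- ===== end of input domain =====

-- B interchanges the two loops: it accumulates each row's contribution into the whole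
-- result vector in one pass over zip(A,B), instead of computing one output scalar at a time.


-- ===== PORT A =====
def CPU_loop_ArrayMatMul (A : List Int) (B : List (List Int)) : List Int :=
  let NcA : Int := A.length
  let NcB : Int := ((PySem.List.pyGet? B 0).getD []).length
  (PySem.List.pyRange 0 NcB 1).foldl
    (fun res i =>
      res ++ [(PySem.List.pyRange 0 NcA 1).foldl
        (fun sum j => sum + PySem.List.pyGetD (PySem.List.pyGetD B j []) i 0 * PySem.List.pyGetD A j 0) 0])
    []

-- ===== PORT B =====
def CPU_loop_ArrayMatMul_alt (A : List Int) (B : List (List Int)) : List Int :=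
  let NcB : Nat := ((PySem.List.pyGet? B 0).getD []).length
  (A.zip B).foldl
    (fun res p =>
      (List.range NcB).map (fun i : Nat => PySem.List.pyGetD res (i : Int) 0 + PySem.List.pyGetD p.2 (i : Int) 0 * p.1))
    (List.replicate NcB 0)

-- ===== PRECONDITION & SPEC =====
-- Pre_ excludes exactly the inputs where A raises: B = [] (IndexError on B[0]),
-- len(A) ≠ len(B) (AssertionError), or a row shorter than len(B[0]) (IndexError).
def Pre_CPU_loop_ArrayMatMul (A : List Int) (B : List (List Int)) : Prop :=
  B ≠ [] ∧ A.length = B.length ∧ ∀ row ∈ B, (B.headD []).length ≤ row.length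
instance (A : List Int) (B : List (List Int)) : Decidable (Pre_CPU_loop_ArrayMatMul A B) := by
  unfold Pre_CPU_loop_ArrayMatMul; infer_instance

def pvWitness_CPU_loop_ArrayMatMul : List Int × List (List Int) := ([2, -3], [[1, 4], [5, 0]])

def Spec_CPU_loop_ArrayMatMul (A : List Int) (B : List (List Int)) (out : List Int) : Prop := out = CPU_loop_ArrayMatMul_alt A B
instance (A : List Int) (B : List (List Int)) (out : List Int) : Decidable (Spec_CPU_loop_ArrayMatMul A B out) := by unfold Spec_CPU_loop_ArrayMatMul; infer_instance

-- ===== CLAIM (what is proved, stated in full; the proofs are below) =====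
def Claim_equal_CPU_loop_ArrayMatMul : Prop := ∀ (A : List Int) (B : List (List Int)), Dom_CPU_loop_ArrayMatMul A B → Pre_CPU_loop_ArrayMatMul A B → Spec_CPU_loop_ArrayMatMul A B (CPU_loop_ArrayMatMul A B)

-- ===== LEMMAS AND PROOFS =====

-- The common closed form: entry i is the sum over rows of B[j][i]*A[j].
def pvDot (L : List (Int × List Int)) (i : Nat) : Int :=
  (L.map (fun p => PySem.List.pyGetD p.2 (i : Int) 0 * p.1)).sum

-- A's inner j-loop, per column i, equals pvDot of the zipped rows.
theorem pvA_inner (A : List Int) (B : List (List Int)) (h : A.length = B.length) (i : Nat) :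
    (PySem.List.pyRange 0 (A.length : Int) 1).foldl
      (fun sum j => sum + PySem.List.pyGetD (PySem.List.pyGetD B j []) (i : Int) 0 * PySem.List.pyGetD A j 0) 0
    = pvDot (A.zip B) i := by
  rw [PySem.List.foldl_add]
  rw [zero_add]
  unfold pvDot
  congr 1
  have hr : PySem.List.pyRange 0 (A.length : Int) 1 = (List.range A.length).map (fun k : Nat => (k : Int)) := by
    rw [PySem.List.pyRange_one]; simp
  rw [hr, List.map_map]
  apply List.ext_getElem
  · simp [List.length_zip, h]
  · intro k hk1 hk2
    simp only [List.getElem_map, List.getElem_range, Function.comp_apply, List.getElem_zip]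
    have hkA : k < A.length := by simpa using hk1
    have hkB : k < B.length := h ▸ hkA
    simp only [PySem.List.pyGetD_natCast]
    rw [List.getD_eq_getElem _ _ hkB, List.getD_eq_getElem _ _ hkA]

-- B's row-loop invariant: folding rows into a vector (range n).map f adds pvDot pointwise.
theorem pvB_inv (n : Nat) (L : List (Int × List Int)) (f : Nat → Int) :
    L.foldl
      (fun res p =>
        (List.range n).map (fun i : Nat => PySem.List.pyGetD res (i : Int) 0 + PySem.List.pyGetD p.2 (i : Int) 0 * p.1))
      ((List.range n).map f)
    = (List.range n).map (fun i => f i + pvDot L i) := by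
  induction L generalizing f with
  | nil => simp [pvDot]
  | cons p L ih =>
    simp only [List.foldl_cons]
    have hstep :
        (List.range n).map (fun i : Nat => PySem.List.pyGetD ((List.range n).map f) (i : Int) 0 + PySem.List.pyGetD p.2 (i : Int) 0 * p.1)
        = (List.range n).map (fun i => f i + PySem.List.pyGetD p.2 (i : Int) 0 * p.1) := by
      apply List.map_congr_left
      intro i hi
      have hin : i < n := List.mem_range.mp hi
      rw [PySem.List.pyGetD_natCast, List.getD_eq_getElem _ _ (by simpa using hin)]
      simp
    rw [hstep, ih (fun i => f i + PySem.List.pyGetD p.2 (i : Int) 0 * p.1)]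
    apply List.map_congr_left
    intro i _
    unfold pvDot
    simp only [List.map_cons, List.sum_cons]
    ring

theorem pvReplicate_eq_map (n : Nat) : List.replicate n (0 : Int) = (List.range n).map (fun _ => 0) := by
  simp [List.map_const']

-- ===== VERDICT (by name: the statement is the Claim_ definition above) =====
theorem CPU_loop_ArrayMatMul_spec : Claim_equal_CPU_loop_ArrayMatMul := by
  intro A B _ hpre
  obtain ⟨hB, hlen, _⟩ := hpre
  unfold Spec_CPU_loop_ArrayMatMul CPU_loop_ArrayMatMul CPU_loop_ArrayMatMul_alt
  simp only []
  set n : Nat := ((PySem.List.pyGet? B 0).getD []).length with hn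
  rw [PySem.List.foldl_append_singleton_eq_map, List.nil_append]
  rw [pvReplicate_eq_map, pvB_inv]
  have houter : PySem.List.pyRange 0 (n : Int) 1 = (List.range n).map (fun k : Nat => (k : Int)) := by
    rw [PySem.List.pyRange_one]; simp
  rw [houter, List.map_map]
  apply List.map_congr_left
  intro i _
  simp only [Function.comp_apply, zero_add]
  exact pvA_inner A B hlen i
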